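-- pv_equiv track=rewrite | github.com/SAG145/Project-Euler | PEP358 - Cyclic Numbers.py | long_division_9
-- ===== SOURCE A (Python) =====
-- def long_division_9(prime):
--     sum_of_digits = 0
--     nine = prime - 1
--     num_of_9 = 0
--     current_num = 9
--     while num_of_9 < nine:
--         new_digit = current_num // prime
--         sum_of_digits += new_digit
--         current_num = 10*(current_num - prime*new_digit) + 9
--         num_of_9 += 1
--     return sum_of_digits
-- ===== SOURCE B (Python) =====
-- def long_division_9(prime):
--     # Cycle detection on the remainder sequence: sum one period once, multiply.
--     nine = prime - 1
--     total = 0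
--     cur = 9
--     seen = {}
--     i = 0
--     while i < nine:
--         if cur in seen:
--             start, start_sum = seen[cur]
--             period = i - start
--             cycle_sum = total - start_sum
--             remaining = nine - start
--             full = remaining // period
--             rem = remaining % period
--             total = start_sum + full * cycle_sum
--             for _ in range(rem):
--                 d = cur // prime
--                 total += d
--                 cur = 10 * (cur - prime * d) + 9
--             return total
--         seen[cur] = (i, total)
--         d = cur // prime
--         total += d
--         cur = 10 * (cur - prime * d) + 9
--         i += 1
--     return total
-- ===== Notes on version B (the rewrite author's own statement) =====
-- stated objective: alternative
-- what changed: B replaces A's fixed (prime-1)-step long-division loop by cycle detection on the remainder sequence (a dict of seen remainders with their running digit sums): it sums one period once, multiplies by the number of full periods, and simulates only the leftover tail, so it does O(preperiod+period) division steps instead of always prime-1.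
import Mathlib
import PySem

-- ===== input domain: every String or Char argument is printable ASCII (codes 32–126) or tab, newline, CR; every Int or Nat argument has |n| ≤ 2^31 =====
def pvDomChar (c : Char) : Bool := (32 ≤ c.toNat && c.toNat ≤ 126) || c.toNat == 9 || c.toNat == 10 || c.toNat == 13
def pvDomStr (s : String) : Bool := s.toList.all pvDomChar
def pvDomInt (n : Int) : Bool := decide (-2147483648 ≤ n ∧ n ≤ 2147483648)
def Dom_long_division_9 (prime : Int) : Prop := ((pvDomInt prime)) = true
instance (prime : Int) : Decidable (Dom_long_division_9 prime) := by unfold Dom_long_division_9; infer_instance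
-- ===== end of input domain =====

-- B replaces A's (prime-1)-step long-division loop by remainder-cycle detection:
-- sum one period once and multiply by the number of full periods (alternative algorithm).

-- ===== PORT A =====
-- while num_of_9 < nine: accumulate digit, update current_num
def pvALoop (prime : Int) : Nat → Int → Int → Int
  | 0, s, _ => s
  | n + 1, s, c =>
      let d := PySem.Int.floordiv c prime
      pvALoop prime n (s + d) (10 * (c - prime * d) + 9)

def long_division_9 (prime : Int) : Int :=
  pvALoop prime (prime - 1).toNat 0 9

-- ===== PORT B =====
-- the trailing 'for _ in range(rem)' loop of B
def pvBRem (prime : Int) : Nat → Int → Int → Int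
  | 0, t, _ => t
  | n + 1, t, c =>
      let d := PySem.Int.floordiv c prime
      pvBRem prime n (t + d) (10 * (c - prime * d) + 9)

-- the main 'while i < nine' loop of B; fuel = number of remaining loop entries
def pvBLoop (prime nine : Int) : Nat → Int → Int → Int → PySem.Dict Int (Int × Int) → Int
  | 0, _, t, _, _ => t
  | fuel + 1, i, t, c, seen =>
      match PySem.Dict.get? seen c with
      | some (start, startSum) =>
          let period := i - start
          let cycleSum := t - startSum
          let remaining := nine - start
          let full := PySem.Int.floordiv remaining period
          let rem := PySem.Int.mod remaining period
          pvBRem prime rem.toNat (startSum + full * cycleSum) c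
      | none =>
          let d := PySem.Int.floordiv c prime
          pvBLoop prime nine fuel (i + 1) (t + d) (10 * (c - prime * d) + 9)
            (PySem.Dict.insert seen c (i, t))

def long_division_9_alt (prime : Int) : Int :=
  pvBLoop prime (prime - 1) (prime - 1).toNat 0 0 9 PySem.Dict.empty

-- ===== PRECONDITION & SPEC =====
def Spec_long_division_9 (prime : Int) (out : Int) : Prop := out = long_division_9_alt prime
instance (prime : Int) (out : Int) : Decidable (Spec_long_division_9 prime out) := by unfold Spec_long_division_9; infer_instance

-- ===== CLAIM (what is proved, stated in full; the proofs are below) =====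
def Claim_equal_long_division_9 : Prop := ∀ (prime : Int), Dom_long_division_9 prime → Spec_long_division_9 prime (long_division_9 prime)

-- ===== LEMMAS AND PROOFS =====

-- the remainder stream: pvT p k = current_num before step k+1
def pvT (p : Int) : Nat → Int
  | 0 => 9
  | n + 1 =>
      let c := pvT p n
      let d := PySem.Int.floordiv c p
      10 * (c - p * d) + 9

-- prefix digit sums: pvS p k = sum of the first k digits
def pvS (p : Int) : Nat → Int
  | 0 => 0
  | n + 1 => pvS p n + PySem.Int.floordiv (pvT p n) p

theorem pvALoop_eq (p : Int) : ∀ (n k : Nat) (s : Int),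
    pvALoop p n s (pvT p k) = s + (pvS p (k + n) - pvS p k) := by
  intro n
  induction n with
  | zero => intro k s; simp [pvALoop]
  | succ m ih =>
      intro k s
      show pvALoop p m _ _ = _
      have hT : (10 * (pvT p k - p * PySem.Int.floordiv (pvT p k) p) + 9) = pvT p (k + 1) := by
        simp [pvT]
      rw [hT, ih (k + 1)]
      have hS : pvS p (k + 1) = pvS p k + PySem.Int.floordiv (pvT p k) p := rfl
      have harr : k + 1 + m = k + (m + 1) := by omega
      rw [harr, hS]
      ring

theorem pvBRem_eq (p : Int) : ∀ (n k : Nat) (t : Int),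
    pvBRem p n t (pvT p k) = t + (pvS p (k + n) - pvS p k) := by
  intro n
  induction n with
  | zero => intro k t; simp [pvBRem]
  | succ m ih =>
      intro k t
      show pvBRem p m _ _ = _
      have hT : (10 * (pvT p k - p * PySem.Int.floordiv (pvT p k) p) + 9) = pvT p (k + 1) := by
        simp [pvT]
      rw [hT, ih (k + 1)]
      have hS : pvS p (k + 1) = pvS p k + PySem.Int.floordiv (pvT p k) p := rfl
      have harr : k + 1 + m = k + (m + 1) := by omega
      rw [harr, hS]
      ring

-- periodicity of the remainder stream after a repeated value
theorem pvT_shift (p : Int) (a b : Nat) (h : pvT p a = pvT p b) :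
    ∀ m, pvT p (a + m) = pvT p (b + m) := by
  intro m
  induction m with
  | zero => simpa using h
  | succ k ih =>
      rw [Nat.add_succ, Nat.add_succ]
      simp only [pvT, ih]

-- additivity of prefix sums over one period, for indices ≥ the cycle start
theorem pvS_shift (p : Int) (a d : Nat) (h : pvT p a = pvT p (a + d)) :
    ∀ k, a ≤ k → pvS p (k + d) = pvS p k + (pvS p (a + d) - pvS p a) := by
  intro k hk
  induction k with
  | zero =>
      have h0 : a = 0 := Nat.le_zero.mp hk
      subst h0; simp
  | succ m ih =>
      by_cases hm : a ≤ m
      · have hTm : pvT p (m + d) = pvT p m := by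
          obtain ⟨e, he⟩ := Nat.le.dest hm
          have hsh := pvT_shift p (a + d) a h.symm e
          rw [← he]
          have h1 : a + d + e = a + e + d := by omega
          rw [← h1, hsh]
        have h1 : m + 1 + d = (m + d) + 1 := by omega
        rw [h1]
        show pvS p (m + d) + PySem.Int.floordiv (pvT p (m + d)) p = _
        rw [ih hm, hTm]
        show _ = pvS p m + PySem.Int.floordiv (pvT p m) p + _
        ring
      · have h0 : a = m + 1 := by omega
        subst h0; simp

-- many periods at once
theorem pvS_cycles (p : Int) (a d : Nat) (h : pvT p a = pvT p (a + d)) :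
    ∀ (q r : Nat), pvS p (a + q * d + r) = pvS p (a + r) + q * (pvS p (a + d) - pvS p a) := by
  intro q
  induction q with
  | zero => intro r; simp
  | succ n ih =>
      intro r
      have h1 : a + (n + 1) * d + r = (a + n * d + r) + d := by ring
      rw [h1, pvS_shift p a d h _ (by omega), ih r]
      push_cast
      ring

-- the dict invariant: every stored entry records a genuine earlier (index, prefix-sum) pair
def pvInv (p : Int) (i : Nat) (seen : PySem.Dict Int (Int × Int)) : Prop :=
  ∀ c j s, PySem.Dict.get? seen c = some (j, s) →
    ∃ jn : Nat, j = (jn : Int) ∧ jn < i ∧ pvT p jn = c ∧ s = pvS p jn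

theorem pvBLoop_eq (p : Int) (N : Nat) (hN : (p - 1).toNat = N) :
    ∀ (fuel iN : Nat) (seen : PySem.Dict Int (Int × Int)),
    fuel + iN = N → pvInv p iN seen →
    pvBLoop p (p - 1) fuel (iN : Int) (pvS p iN) (pvT p iN) seen = pvS p N := by
  intro fuel
  induction fuel with
  | zero =>
      intro iN seen hfi _
      have h0 : iN = N := by omega
      subst h0; rfl
  | succ m ih =>
      intro iN seen hfi hinv
      rw [pvBLoop]
      cases hget : PySem.Dict.get? seen (pvT p iN) with
      | none =>
          -- continue the loop
          have hT : (10 * (pvT p iN - p * PySem.Int.floordiv (pvT p iN) p) + 9) = pvT p (iN + 1) := by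
            simp [pvT]
          have hS : pvS p iN + PySem.Int.floordiv (pvT p iN) p = pvS p (iN + 1) := rfl
          simp only [hT, hS]
          have hcast : (iN : Int) + 1 = ((iN + 1 : Nat) : Int) := by push_cast; ring
          rw [hcast]
          apply ih (iN + 1) _ (by omega)
          intro c j s hc
          by_cases hceq : c = pvT p iN
          · subst hceq
            rw [PySem.Dict.get?_insert, if_pos rfl] at hc
            injection hc with h'
            refine ⟨iN, ?_, by omega, rfl, ?_⟩
            · exact (congrArg Prod.fst h').symm
            · exact (congrArg Prod.snd h').symm
          · rw [PySem.Dict.get?_insert, if_neg hceq] at hc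
            obtain ⟨jn, h1, h2, h3, h4⟩ := hinv c j s hc
            exact ⟨jn, h1, by omega, h3, h4⟩
      | some v =>
          obtain ⟨start, startSum⟩ := v
          obtain ⟨jn, hj, hjlt, hjT, hjS⟩ := hinv _ _ _ hget
          subst hj hjS
          show pvBRem p (PySem.Int.mod ((p - 1) - (jn : Int)) ((iN : Int) - (jn : Int))).toNat
              (pvS p jn + PySem.Int.floordiv ((p - 1) - (jn : Int)) ((iN : Int) - (jn : Int)) *
                (pvS p iN - pvS p jn))
              (pvT p iN) = pvS p N
          have hiltN : iN < N := by omega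
          have hdpos : (0 : Int) < (iN : Int) - (jn : Int) := by
            have := hjlt
            omega
          have hp1 : p - 1 = (N : Int) := by omega
          have hrpos : (0 : Int) < (p - 1) - (jn : Int) := by omega
          rw [PySem.Int.floordiv_eq_ediv_of_pos hdpos, PySem.Int.mod_eq_emod_of_pos hdpos]
          set rema : Int := (p - 1) - (jn : Int) with hrema
          set per : Int := (iN : Int) - (jn : Int) with hper
          have hqnn : 0 ≤ rema / per := Int.ediv_nonneg (le_of_lt hrpos) (le_of_lt hdpos)
          have hrnn : 0 ≤ rema % per := Int.emod_nonneg rema (by omega)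
          have hrlt : rema % per < per := Int.emod_lt_of_pos rema hdpos
          have hdecomp : per * (rema / per) + rema % per = rema := Int.ediv_add_emod rema per
          set q : Int := rema / per with hq
          set r : Int := rema % per with hr
          obtain ⟨qn, hqn⟩ : ∃ qn : Nat, q = (qn : Int) := ⟨q.toNat, (Int.toNat_of_nonneg hqnn).symm⟩
          obtain ⟨rn, hrn⟩ : ∃ rn : Nat, r = (rn : Int) := ⟨r.toNat, (Int.toNat_of_nonneg hrnn).symm⟩
          have hrtn : r.toNat = rn := by omega
          have hcyc : pvT p jn = pvT p (jn + (iN - jn)) := by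
            rw [Nat.add_sub_cancel' (le_of_lt hjlt)]
            exact hjT
          rw [hrtn, ← hjT, pvBRem_eq p rn jn]
          have hkey : ((iN - jn : Nat) : Int) = per := by omega
          have hNdecomp : N = jn + qn * (iN - jn) + rn := by
            have h2 := hdecomp
            rw [hqn, hrn, ← hkey] at h2
            have h3 : ((qn * (iN - jn) : Nat) : Int) = ((iN - jn : Nat) : Int) * (qn : Int) := by
              push_cast
              ring
            omega
          have hSN : pvS p N = pvS p (jn + rn) + qn * (pvS p (jn + (iN - jn)) - pvS p jn) := by
            rw [hNdecomp]
            exact pvS_cycles p jn (iN - jn) hcyc qn rn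
          rw [hSN, Nat.add_sub_cancel' (le_of_lt hjlt), hqn]
          ring

-- ===== VERDICT (by name: the statement is the Claim_ definition above) =====
theorem long_division_9_spec : Claim_equal_long_division_9 := by
  intro p _
  show long_division_9 p = long_division_9_alt p
  unfold long_division_9 long_division_9_alt
  have hA := pvALoop_eq p (p - 1).toNat 0 0
  simp only [Nat.zero_add] at hA
  have hB := pvBLoop_eq p (p - 1).toNat rfl (p - 1).toNat 0 PySem.Dict.empty (by omega)
    (by intro c j s h; simp [PySem.Dict.get?_empty] at h)
  simp only [Nat.cast_zero] at hB
  calc pvALoop p (p - 1).toNat 0 9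
      = pvALoop p (p - 1).toNat 0 (pvT p 0) := rfl
    _ = pvS p (p - 1).toNat := by rw [hA]; simp [pvS]
    _ = pvBLoop p (p - 1) (p - 1).toNat 0 (pvS p 0) (pvT p 0) PySem.Dict.empty := hB.symm
    _ = pvBLoop p (p - 1) (p - 1).toNat 0 0 9 PySem.Dict.empty := rfl
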